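-- pv_equiv track=rewrite | github.com/ilandaniele/Information-Retrieval-and-the-Internet | QueryProcessing.py | bigram
-- ===== SOURCE A (Python) =====
-- def bigram(array, begin, end):  #if begin == 1 then we add the term $letter to the bigram, same with end
--                                 #if not then we do not add it
--     i = 0
--     bigram = []
--     anterior=''
--     for letter in array:
--         word=''
--         if(i == 0 and begin == 1):
--             word = '$'+ letter
--         else:
--             if(i != 0):
--                 word = anterior + letter
--
--         if(word != ''):
--             bigram.append(word)
--         anterior=letter
--         i=i+1
--         if(i == len(array) and end==1):
--             word=letter + '$'
--             if(word != ''):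
--                 bigram.append(word)
--
--     return bigram
-- ===== SOURCE B (Python) =====
-- def bigram(array, begin, end):
--     # pad with '$' sentinel tokens, then a loop-free pairwise map/filter:
--     # no index counter, no previous-element carry, no in-loop boundary checks
--     ext = (['$'] if array and begin == 1 else []) + array + (['$'] if array and end == 1 else [])
--     return list(filter(None, map(str.__add__, ext, ext[1:])))
-- ===== Notes on version B (the rewrite author's own statement) =====
-- stated objective: simpler
-- what changed: Instead of A's single stateful loop (index counter, 'anterior' carry, in-loop boundary conditionals), B pre-pads the list with '$' sentinel tokens so boundary markers need no special-case logic, then produces the result loop-free as a pairwise map over the padded list with empty concatenations filtered out.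
import Mathlib
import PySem

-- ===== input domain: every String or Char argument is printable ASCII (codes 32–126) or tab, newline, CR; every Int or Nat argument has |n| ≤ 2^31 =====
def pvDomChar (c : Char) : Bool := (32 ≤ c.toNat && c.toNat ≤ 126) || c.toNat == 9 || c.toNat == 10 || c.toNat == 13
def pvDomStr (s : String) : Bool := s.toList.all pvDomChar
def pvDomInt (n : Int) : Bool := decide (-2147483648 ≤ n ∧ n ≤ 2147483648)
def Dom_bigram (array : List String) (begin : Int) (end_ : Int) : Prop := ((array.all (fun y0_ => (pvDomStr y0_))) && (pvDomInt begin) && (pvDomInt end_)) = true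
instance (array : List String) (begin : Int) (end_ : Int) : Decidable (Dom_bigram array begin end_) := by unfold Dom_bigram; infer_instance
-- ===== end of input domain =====

set_option maxRecDepth 4000

-- B pads the input with '$' sentinel tokens and then does a loop-free pairwise
-- map/filter, instead of A's stateful loop with in-loop boundary checks; objective: simpler.


-- ===== PORT A =====
-- one fold step of A's loop: state = (i, bigram-list, anterior); n = len(array)
def bigramStep (begin end_ n : Int) (st : Int × List String × String) (letter : String) :
    Int × List String × String :=
  let i := st.1
  let bg := st.2.1
  let anterior := st.2.2
  let word : String :=
    if i = 0 ∧ begin = 1 then "$" ++ letter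
    else if i ≠ 0 then anterior ++ letter else ""
  let bg := if word ≠ "" then bg ++ [word] else bg
  let i := i + 1
  let bg :=
    if i = n ∧ end_ = 1 then
      let word := letter ++ "$"
      if word ≠ "" then bg ++ [word] else bg
    else bg
  (i, bg, letter)

def bigram (array : List String) (begin : Int) (end_ : Int) : List String :=
  (array.foldl (bigramStep begin end_ (array.length : Int)) (0, [], "")).2.1

-- ===== PORT B =====
-- ext[1:] is ext.drop 1; map(str.__add__, xs, ys) truncates to the shorter = zip+map;
-- filter(None, …) keeps the non-empty strings
def bigram_alt (array : List String) (begin : Int) (end_ : Int) : List String :=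
  let ext := (if array ≠ [] ∧ begin = 1 then ["$"] else []) ++ array ++
             (if array ≠ [] ∧ end_ = 1 then ["$"] else [])
  ((ext.zip (ext.drop 1)).map (fun p => p.1 ++ p.2)).filter (fun w => w ≠ "")

-- ===== PRECONDITION & SPEC =====
def Spec_bigram (array : List String) (begin : Int) (end_ : Int) (out : List String) : Prop := out = bigram_alt array begin end_
instance (array : List String) (begin : Int) (end_ : Int) (out : List String) : Decidable (Spec_bigram array begin end_ out) := by unfold Spec_bigram; infer_instance

-- ===== CLAIM (what is proved, stated in full; the proofs are below) =====
def Claim_equal_bigram : Prop := ∀ (array : List String) (begin : Int) (end_ : Int), Dom_bigram array begin end_ → Spec_bigram array begin end_ (bigram array begin end_)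

-- ===== LEMMAS AND PROOFS =====

-- the filtered consecutive-pair concatenations of a list
def coreP (l : List String) : List String :=
  ((l.zip (l.drop 1)).map (fun p => p.1 ++ p.2)).filter (fun w => w ≠ "")

-- invariant of A's fold for all iterations after the first (i ≥ 1)
theorem fold_tail (begin end_ n : Int) (l : List String) :
    ∀ (i : Int) (acc : List String) (ant : String),
      1 ≤ i → i + (l.length : Int) = n →
      ((l.foldl (bigramStep begin end_ n) (i, acc, ant)).2.1 =
        acc ++ coreP (ant :: l) ++
          (if end_ = 1 ∧ l ≠ [] then [l.getLast! ++ "$"] else [])) := by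
  induction l with
  | nil => intro i acc ant _ _; simp [coreP]
  | cons letter rest ih =>
    intro i acc ant hi hn
    have hne : ¬ i = 0 := by omega
    simp only [List.foldl_cons]
    have hstep : bigramStep begin end_ n (i, acc, ant) letter =
        (i + 1,
         (acc ++ (if (ant ++ letter) ≠ "" then [ant ++ letter] else [])) ++
           (if i + 1 = n ∧ end_ = 1 then [letter ++ "$"] else []),
         letter) := by
      simp only [bigramStep]
      rw [if_neg (show ¬(i = 0 ∧ begin = 1) from fun h => hne h.1)]
      split_ifs <;> simp_all
    rw [hstep]
    cases rest with
    | nil =>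
      have hIn : i + 1 = n := by simpa using hn
      simp only [List.foldl_nil, hIn]
      simp only [coreP, List.drop, List.zip_cons_cons, List.zip_nil_right,
        List.map_cons, List.map_nil, List.filter_cons, List.filter_nil]
      by_cases he : end_ = 1 <;> by_cases hw : (ant ++ letter) = "" <;>
        simp_all [List.getLast!]
    | cons b rest' =>
      have hIn' : ¬ (i + 1 = n) := by
        simp only [List.length_cons] at hn; push_cast at hn; omega
      rw [if_neg (show ¬(i + 1 = n ∧ end_ = 1) from fun h => hIn' h.1)]
      simp only [List.append_nil]
      rw [ih (i + 1) _ letter (by omega) (by simp only [List.length_cons] at hn ⊢; push_cast at hn ⊢; omega)]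
      simp only [coreP, List.drop, List.zip_cons_cons, List.map_cons, List.filter_cons]
      by_cases hw : (ant ++ letter) = "" <;>
        simp_all [List.getLast!, List.append_assoc]

-- A equals: optional head marker ++ core pairs ++ optional tail marker
theorem bigram_char (array : List String) (begin end_ : Int) :
    bigram array begin end_ =
      (if array ≠ [] ∧ begin = 1 then ["$" ++ array.headD ""] else []) ++ coreP array ++
      (if array ≠ [] ∧ end_ = 1 then [array.getLast! ++ "$"] else []) := by
  cases array with
  | nil => simp [bigram, coreP]
  | cons a rest =>
    unfold bigram
    simp only [List.foldl_cons]
    have hstep : ∀ (n : Int), bigramStep begin end_ n (0, [], "") a =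
        (1,
         (if begin = 1 then ["$" ++ a] else []) ++
           (if (0 : Int) + 1 = n ∧ end_ = 1 then [a ++ "$"] else []),
         a) := by
      intro n
      simp only [bigramStep]
      split_ifs <;> simp_all
    rw [hstep]
    cases rest with
    | nil =>
      simp only [List.foldl_nil]
      by_cases hb : begin = 1 <;> by_cases he : end_ = 1 <;>
        simp [hb, he, coreP, List.getLast!]
    | cons b rest' =>
      have hlen : ¬ ((0 : Int) + 1 = ((a :: b :: rest').length : Int)) := by
        simp only [List.length_cons]; push_cast; omega
      have hcond : (((0 : Int) + 1 = ((a :: b :: rest').length : Int)) ∧ end_ = 1) = False :=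
        eq_false (fun h => hlen h.1)
      simp only [hcond, if_false, List.append_nil]
      rw [fold_tail begin end_ _ (b :: rest') 1 _ a (by omega)
        (by simp only [List.length_cons]; push_cast; omega)]
      by_cases hb : begin = 1 <;> by_cases he : end_ = 1 <;>
        simp_all [List.getLast!]

theorem dollar_append_ne (a : String) : ("$" ++ a) ≠ "" := by
  intro h
  have := congrArg String.length h
  simp [String.length_append] at this

theorem append_dollar_ne (a : String) : (a ++ "$") ≠ "" := by
  intro h
  have := congrArg String.length h
  simp [String.length_append] at this

theorem coreP_cons_dollar (a : String) (rest : List String) :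
    coreP ("$" :: a :: rest) = ("$" ++ a) :: coreP (a :: rest) := by
  simp [coreP, dollar_append_ne a]

theorem coreP_append_dollar (a : String) (rest : List String) :
    coreP ((a :: rest) ++ ["$"]) = coreP (a :: rest) ++ [(a :: rest).getLast! ++ "$"] := by
  induction rest generalizing a with
  | nil => simp [coreP, append_dollar_ne a, List.getLast!]
  | cons b rest' ih =>
    have h := ih b
    simp only [List.cons_append] at h ⊢
    simp only [coreP, List.drop, List.zip_cons_cons, List.map_cons, List.filter_cons] at h ⊢
    by_cases hw : (a ++ b) = "" <;> simp_all [List.getLast!]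

-- B equals the same characterisation
theorem bigram_alt_char (array : List String) (begin end_ : Int) :
    bigram_alt array begin end_ =
      (if array ≠ [] ∧ begin = 1 then ["$" ++ array.headD ""] else []) ++ coreP array ++
      (if array ≠ [] ∧ end_ = 1 then [array.getLast! ++ "$"] else []) := by
  cases array with
  | nil => simp [bigram_alt, coreP]
  | cons a rest =>
    show coreP _ = _
    by_cases hb : begin = 1 <;> by_cases he : end_ = 1 <;>
      simp only [hb, he, ne_eq, List.cons_ne_nil, not_false_iff, and_true,
        if_true, and_false, if_false, List.nil_append, List.append_nil,
        List.cons_append]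
    · -- begin=1, end=1
      have h1 := coreP_append_dollar a rest
      simp only [List.cons_append] at h1
      rw [show ("$" :: a :: (rest ++ ["$"])) = ("$" :: (a :: rest ++ ["$"])) by simp]
      rw [show ("$" :: (a :: rest ++ ["$"])) = ("$" :: a :: (rest ++ ["$"])) by simp,
        coreP_cons_dollar a (rest ++ ["$"]), h1]
      simp [List.headD]
    · rw [coreP_cons_dollar a rest]; simp [List.headD]
    · have h1 := coreP_append_dollar a rest
      simpa using h1

-- ===== VERDICT (by name: the statement is the Claim_ definition above) =====
theorem bigram_spec : Claim_equal_bigram := by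
  intro array begin end_ _
  show bigram array begin end_ = bigram_alt array begin end_
  rw [bigram_char, bigram_alt_char]
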